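-- pv_equiv track=rewrite | github.com/sarbeshtiwari/arc-agi-3 | environment_files/vx01/vx01.py | _make_floor
-- ===== SOURCE A (Python) =====
-- C_BLACK         = 0
--
-- C_FLOOR         = 5
--
-- def _make_floor(T):
--     if T == 1:
--         return [[C_FLOOR]]
--     if T == 2:
--         return [[C_FLOOR, C_FLOOR], [C_FLOOR, C_FLOOR]]
--     rows = []
--     for r in range(T):
--         row = [C_BLACK] * T
--         if r == 0 or r == T - 1:
--             row[0] = C_FLOOR
--             row[T - 1] = C_FLOOR
--         rows.append(row)
--     return rows
-- ===== SOURCE B (Python) =====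
-- C_BLACK = 0
-- C_FLOOR = 5
--
--
-- def _make_floor(T):
--     edge = {0, T - 1}
--     return [[C_FLOOR if r in edge and c in edge else C_BLACK
--              for c in range(T)]
--             for r in range(T)]
-- ===== Notes on version B (the rewrite author's own statement) =====
-- stated objective: simpler
-- what changed: Replaces A's special-case returns and imperative build-then-mutate loop (allocate black row, conditionally overwrite its endpoints) with a pure per-cell formula: cell (r,c) is floor iff both coordinates lie in the edge set {0, T-1}, computed in a single nested comprehension with no mutation and no branches on T.
import Mathlib
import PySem

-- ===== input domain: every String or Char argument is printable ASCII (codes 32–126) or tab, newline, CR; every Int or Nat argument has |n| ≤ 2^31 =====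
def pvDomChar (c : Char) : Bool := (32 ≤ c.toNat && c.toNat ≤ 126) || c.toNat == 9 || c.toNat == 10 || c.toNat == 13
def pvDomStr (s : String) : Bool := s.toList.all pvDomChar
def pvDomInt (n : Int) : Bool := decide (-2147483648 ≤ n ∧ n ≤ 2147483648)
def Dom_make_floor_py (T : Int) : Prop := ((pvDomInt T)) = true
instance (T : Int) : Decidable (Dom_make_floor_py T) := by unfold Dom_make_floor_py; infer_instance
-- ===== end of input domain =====

-- B replaces A's special cases and build-then-mutate loop by a pure per-cell formula:
-- cell (r,c) is floor iff r and c both lie in the edge set {0, T-1} (objective: simpler).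

-- ===== PORT A =====
-- [0]*T is List.replicate T.toNat 0 (negative T gives the empty list, as in Python);
-- row[0]=… / row[T-1]=… are in-range nonnegative assignments (T ≥ 3 whenever the loop
-- body runs past the early returns), so List.set is exact there.
def make_floor_py (T : Int) : List (List Int) :=
  if T == 1 then [[5]]
  else if T == 2 then [[5, 5], [5, 5]]
  else
    (PySem.List.pyRange 0 T 1).foldl (fun rows r =>
      let row := List.replicate T.toNat (0 : Int)
      let row := if r == 0 || r == T - 1 then (row.set 0 5).set (T - 1).toNat 5 else row
      rows ++ [row]) []

-- ===== PORT B =====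
-- {0, T-1} is PySem.Set.ofList [0, T-1]; 'r in edge' is Set.contains; the nested
-- comprehension is a map over pyRange inside a map over pyRange.
def make_floor_py_alt (T : Int) : List (List Int) :=
  let edge := PySem.Set.ofList [0, T - 1]
  (PySem.List.pyRange 0 T 1).map (fun r =>
    (PySem.List.pyRange 0 T 1).map (fun c =>
      if PySem.Set.contains edge r && PySem.Set.contains edge c then 5 else 0))

-- ===== PRECONDITION & SPEC =====
def Spec_make_floor_py (T : Int) (out : List (List Int)) : Prop := out = make_floor_py_alt T
instance (T : Int) (out : List (List Int)) : Decidable (Spec_make_floor_py T out) := by unfold Spec_make_floor_py; infer_instance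

-- ===== CLAIM =====
def Claim_equal_make_floor_py : Prop := ∀ (T : Int), Dom_make_floor_py T → Spec_make_floor_py T (make_floor_py T)

-- ===== LEMMAS AND PROOFS =====

-- A's loop as a map over the row indices
theorem makeA_eq_map (T : Int) (h1 : T ≠ 1) (h2 : T ≠ 2) :
    make_floor_py T =
      (PySem.List.pyRange 0 T 1).map (fun r =>
        if r == 0 || r == T - 1
        then ((List.replicate T.toNat (0 : Int)).set 0 5).set (T - 1).toNat 5
        else List.replicate T.toNat (0 : Int)) := by
  simp only [make_floor_py, beq_iff_eq, h1, h2, if_false]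
  rw [PySem.List.foldl_append_singleton_eq_map]
  simp

-- membership in the edge set {0, T-1}, as a boolean test (T ≥ 3 so the two elements differ)
theorem contains_edge (T x : Int) (h : 3 ≤ T) :
    PySem.Set.contains (PySem.Set.ofList [0, T - 1]) x = (x == 0 || x == T - 1) := by
  have hne : ¬((T - 1 : Int) = 0) := by omega
  simp only [PySem.Set.ofList, PySem.Set.contains]
  by_cases hx : x = 0 <;> by_cases hy : x = T - 1 <;> simp [hx, hy, hne]

-- B's inner comprehension at an edge row equals A's corner-marked row (T ≥ 3)
theorem edge_row_eq (T : Int) (h : 3 ≤ T) :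
    (PySem.List.pyRange 0 T 1).map (fun c =>
        if PySem.Set.contains (PySem.Set.ofList [0, T - 1]) c then (5 : Int) else 0) =
      ((List.replicate T.toNat (0 : Int)).set 0 5).set (T - 1).toNat 5 := by
  rw [PySem.List.pyRange_one]
  apply List.ext_getElem
  · simp
  · intro i h1 h2
    simp only [List.getElem_map, List.getElem_range, List.getElem_set,
      List.getElem_replicate, contains_edge T _ h, Bool.or_eq_true, beq_iff_eq]
    have hT1 : (T - 1).toNat = T.toNat - 1 := by omega
    have hi : i < T.toNat := by simpa using h1
    rw [hT1]
    by_cases h0 : i = 0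
    · simp [h0]
    · by_cases hl1 : i = T.toNat - 1
      · have hij : (0 : Int) + (i : Int) = T - 1 := by omega
        simp [hl1]
        omega
      · have hij : ¬((0 : Int) + (i : Int) = 0 ∨ (0 : Int) + (i : Int) = T - 1) := by omega
        simp only [if_neg hij, if_neg (by omega : ¬ T.toNat - 1 = i),
          if_neg (by omega : ¬ 0 = i)]

theorem make_floor_py_big (T : Int) (h : 3 ≤ T) :
    make_floor_py T = make_floor_py_alt T := by
  rw [makeA_eq_map T (by omega) (by omega)]
  simp only [make_floor_py_alt]
  apply List.map_congr_left
  intro r hr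
  by_cases he : (r == 0 || r == T - 1) = true
  · rw [he, if_pos rfl, ← edge_row_eq T h]
    apply List.map_congr_left
    intro c _
    rw [contains_edge T r h, he, Bool.true_and]
  · have he' : (r == 0 || r == T - 1) = false := by simpa using he
    rw [he', if_neg (by simp)]
    symm
    rw [List.eq_replicate_iff]
    refine ⟨by rw [PySem.List.pyRange_one]; simp, ?_⟩
    intro x hx
    simp only [List.mem_map] at hx
    obtain ⟨c, _, rfl⟩ := hx
    rw [contains_edge T r h, he', Bool.false_and, if_neg (by simp)]

-- ===== VERDICT =====
theorem make_floor_py_spec : Claim_equal_make_floor_py := by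
  intro T _hDom
  unfold Spec_make_floor_py
  by_cases h3 : 3 ≤ T
  · exact make_floor_py_big T h3
  · by_cases h1 : T = 1
    · subst h1; decide
    · by_cases h2 : T = 2
      · subst h2; decide
      · have hT : T ≤ 0 := by omega
        simp [make_floor_py, make_floor_py_alt, h1, h2,
          PySem.List.pyRange_one_eq_nil hT]
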